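-- pv_equiv track=rewrite | github.com/Dimabelegonov/mipt_inf | 2sem/Contest1/H.py | func
-- ===== SOURCE A (Python) =====
-- def func(N, a):
--     arr = [0] * N
--     for i in range(1, N):
--         if i == 1:
--             arr[i] = abs(a[i] - a[i - 1])
--         else:
--             arr[i] = min(arr[i - 1] + abs(a[i] - a[i - 1]), arr[i - 2] + 3 * abs(a[i] - a[i - 2]))
--     return arr[-1]
-- ===== SOURCE B (Python) =====
-- def relax(dp, j, v):
--     # lower dp[j] to v if unset or improved
--     if dp[j] is None or v < dp[j]:
--         dp[j] = v
--
-- def func(N, a):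
--     # Forward push-relaxation DP: dp[j] = min cost to reach j, pushed to successors.
--     dp = [None] * N
--     dp[0] = 0
--     for i in range(N):
--         c = dp[i]
--         if i + 1 < N:
--             relax(dp, i + 1, c + abs(a[i + 1] - a[i]))
--         if i + 2 < N:
--             relax(dp, i + 2, c + 3 * abs(a[i + 2] - a[i]))
--     return dp[-1]
-- ===== Notes on version B (the rewrite author's own statement) =====
-- stated objective: alternative
-- what changed: Replaces the backward pull-DP (each arr[i] computed as a min over its two predecessors, with a special case for i==1) by a forward push-relaxation DP over an Option-valued table: dp[0]=0 and each visited index relaxes its two successors, so no predecessor case split is needed.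
import Mathlib
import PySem

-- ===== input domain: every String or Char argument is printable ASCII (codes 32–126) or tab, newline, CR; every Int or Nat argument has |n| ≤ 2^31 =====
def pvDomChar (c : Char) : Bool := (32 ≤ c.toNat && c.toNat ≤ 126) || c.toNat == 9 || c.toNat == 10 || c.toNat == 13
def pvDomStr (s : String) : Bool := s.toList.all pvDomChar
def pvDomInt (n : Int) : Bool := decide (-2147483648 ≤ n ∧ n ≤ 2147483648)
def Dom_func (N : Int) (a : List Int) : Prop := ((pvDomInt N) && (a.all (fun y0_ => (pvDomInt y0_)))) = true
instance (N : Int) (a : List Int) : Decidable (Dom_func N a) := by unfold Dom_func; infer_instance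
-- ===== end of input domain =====

-- B replaces A's backward pull-DP by a forward push-relaxation DP (same recurrence, same values).

-- ===== PORT A =====
def func (N : Int) (a : List Int) : Int :=
  let arr := List.replicate N.toNat (0 : Int)
  let arr := (PySem.List.pyRange 1 N 1).foldl (fun arr i =>
    if i = 1 then
      PySem.List.pySetD arr i (|PySem.List.pyGetD a i 0 - PySem.List.pyGetD a (i-1) 0|)
    else
      PySem.List.pySetD arr i
        (min (PySem.List.pyGetD arr (i-1) 0 + |PySem.List.pyGetD a i 0 - PySem.List.pyGetD a (i-1) 0|)
             (PySem.List.pyGetD arr (i-2) 0 + 3 * |PySem.List.pyGetD a i 0 - PySem.List.pyGetD a (i-2) 0|))) arr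
  PySem.List.pyGetD arr (-1) 0

-- ===== PORT B =====
-- relax(dp, j, v): Python mutates dp in place; the port returns the updated list.
def relaxB (dp : List (Option Int)) (j : Int) (v : Int) : List (Option Int) :=
  match PySem.List.pyGetD dp j none with
  | none => PySem.List.pySetD dp j (some v)
  | some w => if v < w then PySem.List.pySetD dp j (some v) else dp

def func_alt (N : Int) (a : List Int) : Int :=
  let dp : List (Option Int) := List.replicate N.toNat none
  let dp := PySem.List.pySetD dp 0 (some 0)
  let dp := (PySem.List.pyRange 0 N 1).foldl (fun dp i =>
    let c := (PySem.List.pyGetD dp i none).getD 0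
    let dp := if i + 1 < N then relaxB dp (i+1) (c + |PySem.List.pyGetD a (i+1) 0 - PySem.List.pyGetD a i 0|) else dp
    if i + 2 < N then relaxB dp (i+2) (c + 3 * |PySem.List.pyGetD a (i+2) 0 - PySem.List.pyGetD a i 0|) else dp) dp
  (PySem.List.pyGetD dp (-1) none).getD 0

-- ===== PRECONDITION & SPEC =====
-- Pre_ excludes exactly the inputs on which A raises IndexError: N ≤ 0 (arr[-1] on an
-- empty arr) and N ≥ 2 with fewer than N elements in a (out-of-range read a[i]).
def Pre_func (N : Int) (a : List Int) : Prop := 1 ≤ N ∧ (N = 1 ∨ N ≤ a.length)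
instance (N : Int) (a : List Int) : Decidable (Pre_func N a) := by unfold Pre_func; infer_instance
def pvWitness_func : Int × List Int := (4, [0, 3, 1, 7])
def Spec_func (N : Int) (a : List Int) (out : Int) : Prop := out = func_alt N a
instance (N : Int) (a : List Int) (out : Int) : Decidable (Spec_func N a out) := by unfold Spec_func; infer_instance

-- ===== CLAIM (what is proved, stated in full; the proofs are below) =====
def Claim_equal_func : Prop := ∀ (N : Int) (a : List Int), Dom_func N a → Pre_func N a → Spec_func N a (func N a)

-- ===== LEMMAS AND PROOFS =====

-- a[j] with default 0 (both ports read a this way)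
def gv (a : List Int) (j : Nat) : Int := PySem.List.pyGetD a (j : Int) 0

-- the mathematical DP value at index j
def dval (a : List Int) : Nat → Int
  | 0 => 0
  | 1 => |gv a 1 - gv a 0|
  | (k+2) => min (dval a (k+1) + |gv a (k+2) - gv a (k+1)|)
                 (dval a k + 3 * |gv a (k+2) - gv a k|)

-- A's array after the iterations i = 1..k
def arrK (a : List Int) (n k : Nat) : List Int :=
  (List.range n).map (fun j => if j ≤ k then dval a j else 0)

-- B's table after the iterations i = 0..k-1
def dpK (a : List Int) (n k : Nat) : List (Option Int) :=
  (List.range n).map (fun j =>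
    if j ≤ k then some (dval a j)
    else if j = k + 1 ∧ 1 ≤ k then some (dval a (k-1) + 3 * |gv a (k+1) - gv a (k-1)|)
    else none)

theorem pyGetD_arrK (a : List Int) (n k j : Nat) (hj : j < n) :
    PySem.List.pyGetD (arrK a n k) ((j : Nat) : Int) 0 = if j ≤ k then dval a j else 0 := by
  simp [arrK, List.getD_eq_getElem?_getD, hj]

theorem pyGetD_dpK (a : List Int) (n k j : Nat) (hj : j < n) :
    PySem.List.pyGetD (dpK a n k) ((j : Nat) : Int) none =
      (if j ≤ k then some (dval a j)
       else if j = k + 1 ∧ 1 ≤ k then some (dval a (k-1) + 3 * |gv a (k+1) - gv a (k-1)|)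
       else none) := by
  simp [dpK, List.getD_eq_getElem?_getD, hj]

theorem set_map_range {α : Type} (n j : Nat) (f : Nat → α) (v : α) :
    ((List.range n).map f).set j v =
      (List.range n).map (fun x => if x = j then v else f x) := by
  apply List.ext_getElem
  · simp
  · intro i h1 h2
    simp only [List.getElem_set, List.getElem_map, List.getElem_range]
    by_cases h : j = i
    · simp [h]
    · simp [h, Ne.symm h]

theorem funcA_loop (a : List Int) (n : Nat) (hn : 1 ≤ n) :
    ∀ k : Nat, k ≤ n - 1 →
      (PySem.List.pyRange 1 ((k : Int) + 1) 1).foldl (fun arr i =>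
        if i = 1 then
          PySem.List.pySetD arr i (|PySem.List.pyGetD a i 0 - PySem.List.pyGetD a (i-1) 0|)
        else
          PySem.List.pySetD arr i
            (min (PySem.List.pyGetD arr (i-1) 0 + |PySem.List.pyGetD a i 0 - PySem.List.pyGetD a (i-1) 0|)
                 (PySem.List.pyGetD arr (i-2) 0 + 3 * |PySem.List.pyGetD a i 0 - PySem.List.pyGetD a (i-2) 0|)))
        (List.replicate n (0 : Int)) = arrK a n k := by
  intro k hk
  induction k with
  | zero =>
      rw [show ((0:Nat):Int) + 1 = 1 by norm_num, PySem.List.pyRange_one_eq_nil (by omega)]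
      simp only [List.foldl_nil]
      apply List.ext_getElem
      · simp [arrK]
      · intro i h1 h2
        simp only [List.getElem_replicate, arrK, List.getElem_map, List.getElem_range]
        rcases Nat.eq_zero_or_pos i with h | h
        · subst h; simp [dval]
        · rw [if_neg (by omega)]
  | succ k ih =>
      have hk' : k ≤ n - 1 := by omega
      have hkn : k + 1 < n := by omega
      have hc : (((k+1 : Nat)) : Int) + 1 = ((k:Int) + 1) + 1 := by push_cast; ring
      rw [hc, PySem.List.pyRange_one_succ_right (by omega), List.foldl_append, ih hk']
      simp only [List.foldl_cons, List.foldl_nil]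
      rcases Nat.eq_zero_or_pos k with h0 | h0
      · -- first iteration: i = 1
        subst h0
        rw [if_pos (by norm_num)]
        rw [show ((0:Nat):Int) + 1 = ((1:Nat):Int) by norm_num,
            show ((1:Nat):Int) - 1 = ((0:Nat):Int) by norm_num,
            PySem.List.pySetD_natCast]
        unfold arrK
        rw [set_map_range]
        apply List.map_congr_left
        intro x hx
        simp only [List.mem_range] at hx
        by_cases hx1 : x = 1
        · subst hx1; simp [dval, gv]
        · rw [if_neg hx1]
          rcases Nat.eq_zero_or_pos x with h | h
          · subst h; norm_num
          · rw [if_neg (by omega), if_neg (by omega)]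
      · -- later iterations: i = k+1 ≥ 2
        rw [if_neg (by omega)]
        rw [show ((k:Int) + 1 - 1) = ((k:Nat):Int) by ring]
        rw [show ((k:Int) + 1 - 2) = (((k-1 : Nat)):Int) by omega]
        rw [show ((k:Int) + 1) = (((k+1 : Nat)):Int) by push_cast; ring]
        rw [PySem.List.pySetD_natCast,
            pyGetD_arrK a n k k (by omega), pyGetD_arrK a n k (k-1) (by omega),
            if_pos (le_refl k), if_pos (by omega)]
        unfold arrK
        rw [set_map_range]
        apply List.map_congr_left
        intro x hx
        simp only [List.mem_range] at hx
        by_cases hx1 : x = k + 1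
        · subst hx1
          rw [if_pos rfl, if_pos (le_refl (k+1))]
          obtain ⟨m, rfl⟩ : ∃ m, k = m + 1 := ⟨k - 1, by omega⟩
          rw [show m + 1 - 1 = m by omega]
          show _ = dval a (m + 2)
          rw [dval]
          simp [gv, show ((m:Int) + 1 + 1) = (m:Int) + 2 from by ring]
        · rw [if_neg hx1]
          by_cases h2 : x ≤ k
          · rw [if_pos h2, if_pos (by omega)]
          · rw [if_neg h2, if_neg (by omega)]

-- B's table when every reachable entry up to index k is settled and nothing further is pending
def midK (a : List Int) (n k : Nat) : List (Option Int) :=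
  (List.range n).map (fun j => if j ≤ k then some (dval a j) else none)

theorem pyGetD_midK (a : List Int) (n k j : Nat) (hj : j < n) :
    PySem.List.pyGetD (midK a n k) ((j : Nat) : Int) none =
      (if j ≤ k then some (dval a j) else none) := by
  simp [midK, List.getD_eq_getElem?_getD, hj]

theorem relax1 (a : List Int) (n k : Nat) (h1 : k + 1 < n) :
    relaxB (dpK a n k) ((k:Int)+1)
      (dval a k + |PySem.List.pyGetD a ((k:Int)+1) 0 - PySem.List.pyGetD a (k:Int) 0|) =
      midK a n (k+1) := by
  unfold relaxB
  rw [show ((k:Int)+1) = (((k+1:Nat)):Int) by push_cast; ring,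
      pyGetD_dpK a n k (k+1) h1, if_neg (by omega)]
  by_cases h0 : 1 ≤ k
  · obtain ⟨m, rfl⟩ : ∃ m, k = m + 1 := ⟨k - 1, by omega⟩
    rw [if_pos ⟨rfl, h0⟩, show m + 1 - 1 = m by omega]
    simp only []
    have hd : dval a (m+1+1) =
        min (dval a (m+1) + |PySem.List.pyGetD a ((m+1+1:Nat):Int) 0 - PySem.List.pyGetD a ((m+1:Nat):Int) 0|)
            (dval a m + 3 * |gv a (m+1+1) - gv a m|) := by
      show dval a (m+2) = _
      rw [dval]
      rfl
    split_ifs with hvw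
    · rw [PySem.List.pySetD_natCast]
      unfold midK dpK
      rw [set_map_range]
      apply List.map_congr_left
      intro x hx
      simp only [List.mem_range] at hx
      by_cases hx1 : x = m + 1 + 1
      · subst hx1
        rw [if_pos rfl, if_pos (le_refl _), hd, min_eq_left (le_of_lt hvw)]
      · rw [if_neg hx1]
        by_cases h2 : x ≤ m + 1
        · rw [if_pos h2, if_pos (by omega)]
        · rw [if_neg h2, if_neg (by omega), if_neg (by omega)]
    · unfold midK dpK
      apply List.map_congr_left
      intro x hx
      simp only [List.mem_range] at hx
      by_cases h2 : x ≤ m + 1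
      · rw [if_pos h2, if_pos (by omega)]
      · rw [if_neg h2]
        by_cases hx1 : x = m + 1 + 1
        · subst hx1
          rw [if_pos ⟨rfl, by omega⟩, if_pos (le_refl _), show m + 1 - 1 = m by omega,
              hd, min_eq_right (le_of_not_gt hvw)]
        · rw [if_neg (by omega), if_neg (by omega)]
  · -- k = 0: the slot is still unset
    rw [if_neg (by omega)]
    simp only []
    have hk0 : k = 0 := by omega
    subst hk0
    rw [PySem.List.pySetD_natCast]
    unfold midK dpK
    rw [set_map_range]
    apply List.map_congr_left
    intro x hx
    simp only [List.mem_range] at hx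
    by_cases hx1 : x = 0 + 1
    · subst hx1
      rw [if_pos rfl, if_pos (le_refl _)]
      have : dval a (0+1) = |gv a 1 - gv a 0| := by
        show dval a 1 = _
        rw [dval]
      rw [this]
      have h0 : dval a 0 = 0 := by rw [dval]
      rw [h0]
      simp only [gv]
      norm_num
    · rw [if_neg hx1]
      by_cases h2 : x ≤ 0
      · rw [if_pos h2, if_pos (by omega)]
      · rw [if_neg h2, if_neg (by omega), if_neg (by omega)]

theorem relax2 (a : List Int) (n k : Nat) (h2 : k + 2 < n) :
    relaxB (midK a n (k+1)) ((k:Int)+2)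
      (dval a k + 3 * |PySem.List.pyGetD a ((k:Int)+2) 0 - PySem.List.pyGetD a (k:Int) 0|) =
      dpK a n (k+1) := by
  unfold relaxB
  rw [show ((k:Int)+2) = (((k+2:Nat)):Int) by push_cast; ring,
      pyGetD_midK a n (k+1) (k+2) (by omega), if_neg (by omega)]
  simp only []
  rw [PySem.List.pySetD_natCast]
  unfold midK dpK
  rw [set_map_range]
  apply List.map_congr_left
  intro x hx
  simp only [List.mem_range] at hx
  by_cases hx1 : x = k + 2
  · subst hx1
    rw [if_pos rfl, if_neg (by omega), if_pos (by omega), show k + 1 - 1 = k by omega]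
    simp only [gv]
  · rw [if_neg hx1]
    by_cases h3 : x ≤ k + 1
    · rw [if_pos h3, if_pos h3]
    · rw [if_neg h3, if_neg h3, if_neg (by omega)]

theorem mid_eq_dpK (a : List Int) (n k : Nat) (h2 : ¬ (k + 2 < n)) :
    midK a n (k+1) = dpK a n (k+1) := by
  unfold midK dpK
  apply List.map_congr_left
  intro x hx
  simp only [List.mem_range] at hx
  rw [if_pos (by omega), if_pos (by omega)]

theorem dpK_stable (a : List Int) (n k : Nat) (h1 : ¬ (k + 1 < n)) :
    dpK a n k = dpK a n (k+1) := by
  unfold dpK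
  apply List.map_congr_left
  intro x hx
  simp only [List.mem_range] at hx
  rw [if_pos (by omega), if_pos (by omega)]

theorem funcB_loop (a : List Int) (n : Nat) (_hn : 1 ≤ n) :
    ∀ k : Nat, k ≤ n →
      (PySem.List.pyRange 0 (k : Int) 1).foldl (fun dp i =>
        let c := (PySem.List.pyGetD dp i none).getD 0
        let dp := if i + 1 < (n : Int) then relaxB dp (i+1) (c + |PySem.List.pyGetD a (i+1) 0 - PySem.List.pyGetD a i 0|) else dp
        if i + 2 < (n : Int) then relaxB dp (i+2) (c + 3 * |PySem.List.pyGetD a (i+2) 0 - PySem.List.pyGetD a i 0|) else dp)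
        (PySem.List.pySetD (List.replicate n (none : Option Int)) 0 (some 0)) = dpK a n k := by
  intro k hk
  induction k with
  | zero =>
      rw [show ((0:Nat):Int) = 0 by norm_num, PySem.List.pyRange_one_eq_nil (le_refl 0)]
      simp only [List.foldl_nil]
      rw [show (0:Int) = ((0:Nat):Int) by norm_num, PySem.List.pySetD_natCast]
      apply List.ext_getElem
      · simp [dpK]
      · intro i h1 h2
        simp only [List.getElem_set, List.getElem_replicate, dpK, List.getElem_map, List.getElem_range]
        rcases Nat.eq_zero_or_pos i with h | h
        · subst h; simp [dval]
        · rw [if_neg (by omega), if_neg (by omega), if_neg (by omega)]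
  | succ k ih =>
      have hkn : k < n := by omega
      rw [show (((k+1:Nat)):Int) = (k:Int)+1 by push_cast; ring,
          PySem.List.pyRange_one_succ_right (by omega), List.foldl_append, ih (by omega)]
      simp only [List.foldl_cons, List.foldl_nil]
      have hc : (PySem.List.pyGetD (dpK a n k) ((k:Nat):Int) none).getD 0 = dval a k := by
        rw [pyGetD_dpK a n k k hkn, if_pos (le_refl k)]
        rfl
      rw [hc]
      by_cases h2 : k + 2 < n
      · have h1 : k + 1 < n := by omega
        rw [if_pos (show (k:Int)+2 < (n:Int) by omega), if_pos (show (k:Int)+1 < (n:Int) by omega),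
            relax1 a n k h1, relax2 a n k h2]
      · rw [if_neg (show ¬((k:Int)+2 < (n:Int)) by omega)]
        by_cases h1 : k + 1 < n
        · rw [if_pos (show (k:Int)+1 < (n:Int) by omega), relax1 a n k h1]
          exact mid_eq_dpK a n k h2
        · rw [if_neg (show ¬((k:Int)+1 < (n:Int)) by omega)]
          exact dpK_stable a n k h1

-- ===== VERDICT (by name: the statement is the Claim_ definition above) =====
theorem func_spec : Claim_equal_func := by
  intro N a hD hP
  obtain ⟨h1, h2⟩ := hP
  have hN : N = ((N.toNat : Nat) : Int) := by omega
  have hn1 : 1 ≤ N.toNat := by omega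
  unfold Spec_func
  have hA : func N a = dval a (N.toNat - 1) := by
    unfold func
    rw [hN]
    simp only [Int.toNat_natCast]
    rw [show ((N.toNat : Nat) : Int) = (((N.toNat - 1 : Nat)) : Int) + 1 by omega]
    rw [funcA_loop a N.toNat hn1 (N.toNat - 1) (le_refl _)]
    rw [PySem.List.pyGetD_neg_ofNat (arrK a N.toNat (N.toNat - 1)) 1 0 (by norm_num)
      (by simp [arrK]; omega)]
    simp [arrK]
  have hB : func_alt N a = dval a (N.toNat - 1) := by
    unfold func_alt
    rw [hN]
    simp only [Int.toNat_natCast]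
    rw [funcB_loop a N.toNat hn1 N.toNat (le_refl _)]
    rw [PySem.List.pyGetD_neg_ofNat (dpK a N.toNat N.toNat) 1 none (by norm_num)
      (by simp [dpK]; omega)]
    simp [dpK]
  rw [hA, hB]
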